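-- pv_equiv track=rewrite | github.com/changsicong/similar_documents_filter | minhash.py | create_doc_signature
-- ===== SOURCE A (Python) =====
-- def create_doc_signature(docid_to_shingling_set, all_tokens):
--     docid_to_signature = dict()
--     for docid in docid_to_shingling_set:
--         #loop through each doc
--         words = docid_to_shingling_set[docid]
--         wordsSignature = set()
--         for i in range(len(all_tokens)):
--             # loop through all the tokens
--             if all_tokens[i] in words:
--                 wordsSignature.add(i)
--         docid_to_signature[docid] = wordsSignature
--     return docid_to_signature
-- ===== SOURCE B (Python) =====
-- def create_doc_signature(docid_to_shingling_set, all_tokens):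
--     # inverted index: token -> docids whose shingling set contains it,
--     # then one pass over all_tokens touching only matching docs
--     sigs = {docid: set() for docid in docid_to_shingling_set}
--     docs_with = {}
--     for docid, words in docid_to_shingling_set.items():
--         for w in set(words):
--             docs_with.setdefault(w, []).append(docid)
--     for i, tok in enumerate(all_tokens):
--         for docid in docs_with.get(tok, ()):
--             sigs[docid].add(i)
--     return sigs
-- ===== Notes on version B (the rewrite author's own statement) =====
-- stated objective: faster
-- what changed: B builds an inverted index (token -> list of docids whose word set contains it) plus per-doc word sets once, then makes a single pass over all_tokens adding index i only to the matching documents, instead of A's per-document scan of the whole token list with an O(W) list membership test inside.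
import Mathlib
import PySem

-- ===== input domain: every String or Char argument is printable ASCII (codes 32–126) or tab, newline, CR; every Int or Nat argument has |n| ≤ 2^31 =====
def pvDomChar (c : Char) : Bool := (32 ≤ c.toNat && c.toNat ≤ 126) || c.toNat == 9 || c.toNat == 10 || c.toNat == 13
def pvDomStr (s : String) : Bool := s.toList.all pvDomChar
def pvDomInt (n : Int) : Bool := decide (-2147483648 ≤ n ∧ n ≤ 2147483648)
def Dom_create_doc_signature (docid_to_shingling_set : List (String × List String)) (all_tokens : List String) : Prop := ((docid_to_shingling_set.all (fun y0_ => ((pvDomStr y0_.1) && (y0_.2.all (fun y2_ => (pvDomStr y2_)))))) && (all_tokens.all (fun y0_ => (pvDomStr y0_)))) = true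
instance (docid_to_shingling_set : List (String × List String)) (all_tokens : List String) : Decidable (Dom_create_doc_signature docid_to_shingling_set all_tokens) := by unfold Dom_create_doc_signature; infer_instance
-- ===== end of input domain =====

-- ===== PORT A =====
-- transliteration of A: for each docid (dict order), scan range(len(all_tokens)) testing list membership
def create_doc_signature (docid_to_shingling_set : List (String × List String)) (all_tokens : List String) : List (String × List Int) :=
  let d := PySem.Dict.ofList docid_to_shingling_set
  let out := d.keys.foldl (fun acc docid =>
      let words := d.getD docid []
      let wordsSignature : PySem.Set Int :=
        (PySem.List.pyRange 0 (all_tokens.length : Int) 1).foldl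
          (fun s i => if words.contains (PySem.List.pyGetD all_tokens i "") then PySem.Set.add s i else s)
          PySem.Set.empty
      acc.insert docid wordsSignature)
    PySem.Dict.empty
  out.items

-- ===== PORT B =====
-- B (one honest line): inverted index — token -> docids whose word set contains it, built once;
-- then a single pass over enumerate(all_tokens) adds index i only to the matching docs (objective: faster).
def create_doc_signature_alt (docid_to_shingling_set : List (String × List String)) (all_tokens : List String) : List (String × List Int) :=
  let d := PySem.Dict.ofList docid_to_shingling_set
  -- sigs = {docid: set() for docid in docid_to_shingling_set}
  let sigs : PySem.Dict String (PySem.Set Int) :=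
    d.keys.foldl (fun acc docid => acc.insert docid PySem.Set.empty) PySem.Dict.empty
  -- docs_with: for each docid, for w in set(words): docs_with.setdefault(w, []).append(docid)
  let docs_with : PySem.Dict String (List String) :=
    d.items.foldl (fun acc p =>
      (PySem.Set.ofList p.2).foldl (fun acc w => acc.modify w [] (fun l => l ++ [p.1])) acc)
      PySem.Dict.empty
  -- for i, tok in enumerate(all_tokens): for docid in docs_with.get(tok, ()): sigs[docid].add(i)
  -- (docid is always a key of sigs, so 'sigs[docid].add(i)' is exactly 'modify docid [] (add · i)')
  let sigs := (PySem.List.enumerate all_tokens).foldl (fun sg q =>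
      (docs_with.getD q.2 []).foldl (fun sg docid => sg.modify docid [] (fun s => PySem.Set.add s q.1)) sg)
    sigs
  sigs.items

-- ===== PRECONDITION & SPEC =====
def Spec_create_doc_signature (docid_to_shingling_set : List (String × List String)) (all_tokens : List String) (out : List (String × List Int)) : Prop := out = create_doc_signature_alt docid_to_shingling_set all_tokens
instance (docid_to_shingling_set : List (String × List String)) (all_tokens : List String) (out : List (String × List Int)) : Decidable (Spec_create_doc_signature docid_to_shingling_set all_tokens out) := by unfold Spec_create_doc_signature; infer_instance

-- ===== CLAIM (what is proved, stated in full; the proofs are below) =====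
def Claim_equal_create_doc_signature : Prop := ∀ (docid_to_shingling_set : List (String × List String)) (all_tokens : List String), Dom_create_doc_signature docid_to_shingling_set all_tokens → Spec_create_doc_signature docid_to_shingling_set all_tokens (create_doc_signature docid_to_shingling_set all_tokens)

-- ===== LEMMAS AND PROOFS =====

theorem pv_add_idem (s : PySem.Set Int) (x : Int) :
    PySem.Set.add (PySem.Set.add s x) x = PySem.Set.add s x := by
  by_cases h : PySem.Set.contains s x <;>
    simp_all [PySem.Set.add, PySem.Set.contains, List.contains_eq_mem]

-- effect of the inner 'for docid in …: sigs[docid].add(i)' loop on one key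
theorem pv_getD_inner (L : List String) (i : Int) (sg : PySem.Dict String (PySem.Set Int)) (k : String) :
    (L.foldl (fun sg d2 => sg.modify d2 [] (fun s => PySem.Set.add s i)) sg).getD k []
      = if k ∈ L then PySem.Set.add (sg.getD k []) i else sg.getD k [] := by
  induction L generalizing sg with
  | nil => simp
  | cons a t ih =>
    simp only [List.foldl_cons, ih, PySem.Dict.getD_modify, List.mem_cons]
    by_cases hk : k = a
    · by_cases ht : k ∈ t
      · simp [hk, ht, pv_add_idem]
      · simp [hk, ht]
    · by_cases ht : k ∈ t <;> simp [hk, ht]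

theorem pv_keys_inner (L : List String) (i : Int) (sg : PySem.Dict String (PySem.Set Int))
    (h : ∀ x ∈ L, x ∈ sg.keys) :
    (L.foldl (fun sg d2 => sg.modify d2 [] (fun s => PySem.Set.add s i)) sg).keys = sg.keys := by
  induction L generalizing sg with
  | nil => rfl
  | cons a t ih =>
    have ha : sg.contains a = true := by
      rw [PySem.Dict.contains_iff_mem_keys]; exact h a (by simp)
    have hkeys : (sg.modify a [] (fun s => PySem.Set.add s i)).keys = sg.keys := by
      simp [PySem.Dict.keys_modify, PySem.Dict.keys_insert_of_contains, ha]
    simp only [List.foldl_cons]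
    rw [ih _ (fun x hx => by rw [hkeys]; exact h x (by simp [hx])), hkeys]

-- the whole token sweep, observed at one key
theorem pv_getD_outer (DW : PySem.Dict String (List String)) (l : List (Int × String))
    (sg : PySem.Dict String (PySem.Set Int)) (k : String) :
    (l.foldl (fun sg q => (DW.getD q.2 []).foldl
        (fun sg docid => sg.modify docid [] (fun s => PySem.Set.add s q.1)) sg) sg).getD k []
      = l.foldl (fun s q => if k ∈ DW.getD q.2 [] then PySem.Set.add s q.1 else s) (sg.getD k []) := by
  induction l generalizing sg with
  | nil => rfl
  | cons q t ih => simp only [List.foldl_cons, ih, pv_getD_inner]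

theorem pv_keys_outer (DW : PySem.Dict String (List String)) (l : List (Int × String))
    (sg : PySem.Dict String (PySem.Set Int))
    (h : ∀ tok, ∀ x ∈ DW.getD tok [], x ∈ sg.keys) :
    (l.foldl (fun sg q => (DW.getD q.2 []).foldl
        (fun sg docid => sg.modify docid [] (fun s => PySem.Set.add s q.1)) sg) sg).keys = sg.keys := by
  induction l generalizing sg with
  | nil => rfl
  | cons q t ih =>
    have hk : ((DW.getD q.2 []).foldl
        (fun sg docid => sg.modify docid [] (fun s => PySem.Set.add s q.1)) sg).keys = sg.keys :=
      pv_keys_inner _ _ _ (h q.2)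
    simp only [List.foldl_cons]
    rw [ih _ (fun tok x hx => by rw [hk]; exact h tok x hx), hk]

-- the sigs initialisation stores only empty sets
theorem pv_getD_init (L : List String) (acc : PySem.Dict String (PySem.Set Int)) (k : String)
    (h : acc.getD k [] = []) :
    (L.foldl (fun a k' => a.insert k' PySem.Set.empty) acc).getD k [] = [] := by
  induction L generalizing acc with
  | nil => exact h
  | cons a t ih =>
    simp only [List.foldl_cons]
    refine ih _ ?_
    rw [PySem.Dict.getD_insert]
    split_ifs <;> simp [h, PySem.Set.empty]

-- a nested fold is a fold over the flattened pair list
theorem pv_foldl_flatMap {α β γ : Type} (l : List α) (g : α → List β) (f : γ → β → γ) (init : γ) :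
    l.foldl (fun acc x => (g x).foldl f acc) init = (l.flatMap g).foldl f init := by
  induction l generalizing init with
  | nil => rfl
  | cons x t ih => simp [List.foldl_cons, List.flatMap_cons, List.foldl_append, ih]

-- what the inverted index holds at a token
theorem pv_DW_getD (ds : List (String × List String)) (tok : String) :
    ((PySem.Dict.ofList ds).items.foldl (fun acc p =>
        (PySem.Set.ofList p.2).foldl (fun acc w => acc.modify w [] (fun l => l ++ [p.1])) acc)
        PySem.Dict.empty).getD tok []
      = (((PySem.Dict.ofList ds).items.flatMap
            (fun p => (PySem.Set.ofList p.2).map (fun w => (w, p.1)))).filter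
          (fun q => q.1 == tok)).map (·.2) := by
  have h1 : ∀ (p : String × List String) (acc : PySem.Dict String (List String)),
      (PySem.Set.ofList p.2).foldl (fun acc w => acc.modify w [] (fun l => l ++ [p.1])) acc
        = ((PySem.Set.ofList p.2).map (fun w => (w, p.1))).foldl
            (fun acc q => acc.modify q.1 [] (fun l => l ++ [q.2])) acc := by
    intro p acc; rw [List.foldl_map]
  simp only [h1]
  rw [pv_foldl_flatMap]
  rw [PySem.Dict.getD_foldl_modify_append]
  simp

theorem pv_mem_DW (ds : List (String × List String)) (tok k : String) :
    (k ∈ (((PySem.Dict.ofList ds).items.flatMap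
            (fun p => (PySem.Set.ofList p.2).map (fun w => (w, p.1)))).filter
          (fun q => q.1 == tok)).map (·.2))
      ↔ ∃ p ∈ (PySem.Dict.ofList ds).items, p.1 = k ∧ tok ∈ p.2 := by
  simp only [List.mem_map, List.mem_filter, List.mem_flatMap, beq_iff_eq, PySem.Set.mem_ofList]
  constructor
  · rintro ⟨q, ⟨⟨p, hp, w, hw, rfl⟩, htok⟩, hk⟩
    simp only at htok hk
    exact ⟨p, hp, hk, htok ▸ hw⟩
  · rintro ⟨p, hp, hk, htok⟩
    exact ⟨(tok, k), ⟨⟨p, hp, tok, htok, by simp [hk]⟩, rfl⟩, rfl⟩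

-- B's sweep at a key equals A's membership-scan, over enumerate
theorem pv_sig_eq (all_tokens : List String) (w : List String) :
    (PySem.List.enumerate all_tokens).foldl
        (fun s q => if w.contains q.2 then PySem.Set.add s q.1 else s) PySem.Set.empty
      = (PySem.List.pyRange 0 (all_tokens.length : Int) 1).foldl
        (fun s i => if w.contains (PySem.List.pyGetD all_tokens i "") then PySem.Set.add s i else s)
        PySem.Set.empty := by
  rw [PySem.List.enumerate_eq_map_pyRange (d := "")]
  rw [List.foldl_map]
  simp

theorem pv_items_fold_insert (l : List String) (v : String → PySem.Set Int)
    (acc : PySem.Dict String (PySem.Set Int))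
    (h : ∀ a ∈ l, acc.contains a = false) (hnd : l.Nodup) :
    (l.foldl (fun acc k => acc.insert k (v k)) acc).items
      = acc.items ++ l.map (fun k => (k, v k)) := by
  induction l generalizing acc with
  | nil => simp
  | cons a t ih =>
    have hfresh : ∀ b ∈ t, (acc.insert a (v a)).contains b = false := by
      intro b hb
      have hba : b ≠ a := fun hba => (List.nodup_cons.1 hnd).1 (hba ▸ hb)
      simp [PySem.Dict.contains_insert, hba, h b (List.mem_cons_of_mem a hb)]
    simp only [List.foldl_cons, List.map_cons]
    rw [ih _ hfresh (List.nodup_cons.1 hnd).2]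
    simp [PySem.Dict.items_insert, h a (List.mem_cons_self ..)]

theorem pv_main (docid_to_shingling_set : List (String × List String)) (all_tokens : List String) :
    create_doc_signature docid_to_shingling_set all_tokens
      = create_doc_signature_alt docid_to_shingling_set all_tokens := by
  unfold create_doc_signature create_doc_signature_alt
  dsimp only
  set d := PySem.Dict.ofList docid_to_shingling_set with hd
  have hnd : d.keys.Nodup := PySem.Dict.nodup_keys_ofList docid_to_shingling_set
  -- A's output dict lists (k, SigA k) over d.keys
  rw [pv_items_fold_insert (acc := PySem.Dict.empty)
      (h := by intro a _; simp [PySem.Dict.contains_empty]) (hnd := hnd)]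
  -- B's final dict: keys are exactly d.keys
  have hkeys0 : (d.keys.foldl (fun acc docid => acc.insert docid (PySem.Set.empty : PySem.Set Int))
      PySem.Dict.empty).keys = d.keys := by
    rw [PySem.Dict.keys_foldl_insert]
    simp [PySem.Set.update_nil_left, PySem.Set.ofList_eq_self_of_nodup _ hnd]
  have hsub : ∀ tok : String, ∀ x ∈ (d.items.foldl (fun acc p =>
        (PySem.Set.ofList p.2).foldl (fun acc w => acc.modify w [] (fun l => l ++ [p.1])) acc)
        PySem.Dict.empty).getD tok [], x ∈ d.keys := by
    intro tok x hx
    rw [hd, pv_DW_getD] at hx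
    obtain ⟨p, hp, hpk, -⟩ := (pv_mem_DW _ _ _).1 hx
    rw [← hd] at hp
    exact hpk ▸ PySem.Dict.mem_keys_of_mem_items _ hp
  have hkeysF := pv_keys_outer _ (PySem.List.enumerate all_tokens) _
      (fun tok x hx => by rw [hkeys0]; exact hsub tok x hx)
  have hie : (PySem.Dict.empty : PySem.Dict String (PySem.Set Int)).items = [] := rfl
  rw [hie, List.nil_append]
  conv_rhs => rw [PySem.Dict.items_eq_map_keys _ (by rw [hkeysF, hkeys0]; exact hnd) [], hkeysF, hkeys0]
  apply List.map_congr_left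
  intro k hk
  obtain ⟨p, hp, hpk⟩ := List.mem_map.1 hk
  have hmem : (k, p.2) ∈ d.items := by rw [← hpk]; simpa using hp
  have hget : d.getD k [] = p.2 := PySem.Dict.getD_of_mem_items _ hmem hnd []
  have hcond : ∀ tok : String, (k ∈ (d.items.foldl (fun acc p =>
        (PySem.Set.ofList p.2).foldl (fun acc w => acc.modify w [] (fun l => l ++ [p.1])) acc)
        PySem.Dict.empty).getD tok []) ↔ p.2.contains tok = true := by
    intro tok
    rw [hd, pv_DW_getD, pv_mem_DW, List.contains_eq_mem]
    constructor
    · rintro ⟨p', hp', hk', htok⟩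
      rw [← hd] at hp'
      have h1 : d.get? k = some p'.2 := PySem.Dict.get?_of_mem_items _
        (show (k, p'.2) ∈ d.items by rw [← hk']; simpa using hp') hnd
      have h2 : d.get? k = some p.2 := PySem.Dict.get?_of_mem_items _ hmem hnd
      have : p'.2 = p.2 := by rw [h1] at h2; exact Option.some_inj.1 h2
      simpa [this] using htok
    · intro htok
      exact ⟨(k, p.2), by rw [← hd]; exact hmem, rfl, by simpa using htok⟩
  rw [pv_getD_outer]
  rw [pv_getD_init _ _ _ (PySem.Dict.getD_empty _ _)]
  simp only [hget, hcond]
  exact Prod.ext rfl (pv_sig_eq all_tokens p.2).symm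

-- ===== VERDICT (by name: the statement is the Claim_ definition above) =====
theorem create_doc_signature_spec : Claim_equal_create_doc_signature := by
  intro ds toks _
  unfold Spec_create_doc_signature
  exact pv_main ds toks
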